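-- pv_equiv track=rewrite | github.com/tchieu008/Algorithm-Analysis-Course | Lab/Lab 03- Week 7/bai2_b.py | multidata
-- ===== SOURCE A (Python) =====
-- def multidata(a,b):
--     def maxidx(data):
--         maxi=0
--         assert data>=0, "a has to be more than zero!!\n"
--         stepdata = []
--         while(data>=10**maxi):
--             stepdata.append(data%(10**(maxi+1))//10**(maxi))
--             maxi+=1
--
--         return stepdata, maxi
--     def sep(a,b):
--         stepdata_a, maxi_a = maxidx(a)
--         stepdata_b, maxi_b = maxidx(b)
--         n_a=maxi_a//2
--
--         if n_a*2<maxi_a: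
--             n_a+=1
--             maxi_a+=1
--             stepdata_a.append(0)
--
--         n_b=maxi_b//2
--
--         if n_b*2<maxi_b:
--             n_b+=1
--             maxi_b+=1
--             stepdata_b.append(0)
--
--         if maxi_a>=maxi_b:
--             n=n_a
--
--             for i in range(maxi_a-maxi_b):
--               stepdata_b.append(0)
--             maxi_b=maxi_a
--         else:
--             n=n_b
--
--             for i in range(maxi_b-maxi_a):
--                 stepdata_a.append(0)
--             maxi_a=maxi_b
--         return maxi_a, maxi_b, n_a, n_b, stepdata_a, stepdata_b, n
--
--     def sep_up(stepdata,n,maxi):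
--         up=""
--         for i in range(0,n):
--             up+=str(stepdata[maxi-i-1])
--         return up
--
--
--     def sep_down(stepdata,n,maxi):
--         down=""
--         for i in range(n,maxi):
--             down+=str(stepdata[maxi-i-1])
--         return down
--     maxi_a, maxi_b, n_a, n_b, stepdata_a, stepdata_b, n = sep(a,b)
--     return n,sep_up(stepdata_a,n,maxi_a),sep_down(stepdata_a,n,maxi_a),sep_up(stepdata_b,n,maxi_b),sep_down(stepdata_b,n,maxi_b)
-- ===== SOURCE B (Python) =====
-- def multidata(a, b):
--     def width(x):
--         assert x >= 0, "a has to be more than zero!!\n"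
--         d = 0 if x == 0 else len(str(x))
--         return d + d % 2
--     D = max(width(a), width(b))
--     n = D // 2
--     def halves(x):
--         if D == 0:
--             return "", ""
--         s = str(x).zfill(D)
--         return s[:n], s[n:]
--     ua, da = halves(a)
--     ub, db = halves(b)
--     return n, ua, da, ub, db
-- ===== Notes on version B (the rewrite author's own statement) =====
-- stated objective: simpler
-- what changed: A extracts digits one by one with modulo/integer division into little-endian lists, pads them with explicit append loops and rebuilds the strings by reversed indexing; B computes each number's even-rounded decimal width directly from str(x), zero-fills the decimal string to the common width and slices it in half.
import Mathlib
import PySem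

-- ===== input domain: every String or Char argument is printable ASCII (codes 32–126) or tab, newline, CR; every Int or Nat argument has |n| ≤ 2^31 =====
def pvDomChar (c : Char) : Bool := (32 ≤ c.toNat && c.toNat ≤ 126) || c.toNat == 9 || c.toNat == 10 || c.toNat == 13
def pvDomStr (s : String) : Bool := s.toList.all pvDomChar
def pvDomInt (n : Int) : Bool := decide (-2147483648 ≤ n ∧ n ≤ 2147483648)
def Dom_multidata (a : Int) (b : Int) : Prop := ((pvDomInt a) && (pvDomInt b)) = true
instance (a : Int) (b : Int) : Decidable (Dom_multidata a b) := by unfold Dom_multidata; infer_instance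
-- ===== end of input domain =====

-- B replaces A's while-loop digit extraction (modulo/division into little-endian digit
-- lists, manual zero-padding loops and index-reversed string building) by a direct
-- string computation: decimal string, zero-fill to the common even width, slice in half.

-- ===== PORT A =====

-- the while-loop of maxidx: while data >= 10**maxi: stepdata.append(data%(10**(maxi+1))//10**(maxi)); maxi += 1
def pvMaxidxGo (data : Int) (stepdata : List Int) (maxi : Nat) : List Int × Nat :=
  if h : (10 : Int) ^ maxi ≤ data then
    pvMaxidxGo data
      (stepdata ++ [PySem.Int.floordiv (PySem.Int.mod data ((10 : Int) ^ (maxi + 1))) ((10 : Int) ^ maxi)])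
      (maxi + 1)
  else
    (stepdata, maxi)
termination_by data.toNat + 1 - maxi
decreasing_by
  have h1 : maxi < 10 ^ maxi := Nat.lt_pow_self (by norm_num)
  have h2 : ((10 ^ maxi : Nat) : Int) ≤ data := by push_cast; exact h
  omega

def pvMaxidx (data : Int) : List Int × Nat := pvMaxidxGo data [] 0

-- sep_up: for i in range(0,n): up += str(stepdata[maxi-i-1])
def pvSepUp (stepdata : List Int) (n maxi : Nat) : List Char :=
  (List.range' 0 n).foldl
    (fun up (i : Nat) => up ++ PySem.Int.toChars (PySem.List.pyGetD stepdata ((maxi : Int) - (i : Int) - 1) 0)) []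

-- sep_down: for i in range(n,maxi): down += str(stepdata[maxi-i-1])
def pvSepDown (stepdata : List Int) (n maxi : Nat) : List Char :=
  (List.range' n (maxi - n)).foldl
    (fun down (i : Nat) => down ++ PySem.Int.toChars (PySem.List.pyGetD stepdata ((maxi : Int) - (i : Int) - 1) 0)) []

def multidata (a : Int) (b : Int) : Int × String × String × String × String :=
  let sda0 := (pvMaxidx a).1
  let ma0 := (pvMaxidx a).2
  let sdb0 := (pvMaxidx b).1
  let mb0 := (pvMaxidx b).2
  -- n_a = maxi_a//2; if n_a*2 < maxi_a: n_a += 1; maxi_a += 1; stepdata_a.append(0)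
  let na0 := ma0 / 2
  let na1 := if na0 * 2 < ma0 then na0 + 1 else na0
  let ma1 := if na0 * 2 < ma0 then ma0 + 1 else ma0
  let sda1 := if na0 * 2 < ma0 then sda0 ++ [(0 : Int)] else sda0
  let nb0 := mb0 / 2
  let nb1 := if nb0 * 2 < mb0 then nb0 + 1 else nb0
  let mb1 := if nb0 * 2 < mb0 then mb0 + 1 else mb0
  let sdb1 := if nb0 * 2 < mb0 then sdb0 ++ [(0 : Int)] else sdb0
  -- if maxi_a >= maxi_b: n = n_a; pad stepdata_b; maxi_b = maxi_a  (else symmetric)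
  let n := if mb1 ≤ ma1 then na1 else nb1
  let sda2 := if mb1 ≤ ma1 then sda1
              else (List.range' 0 (mb1 - ma1)).foldl (fun l _ => l ++ [(0 : Int)]) sda1
  let sdb2 := if mb1 ≤ ma1 then (List.range' 0 (ma1 - mb1)).foldl (fun l _ => l ++ [(0 : Int)]) sdb1
              else sdb1
  let ma2 := if mb1 ≤ ma1 then ma1 else mb1
  let mb2 := if mb1 ≤ ma1 then ma1 else mb1
  ((n : Int),
   String.ofList (pvSepUp sda2 n ma2),
   String.ofList (pvSepDown sda2 n ma2),
   String.ofList (pvSepUp sdb2 n mb2),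
   String.ofList (pvSepDown sdb2 n mb2))

-- ===== PORT B =====

-- width(x): 0 if x == 0 else len(str(x)), rounded up to the next even number
def pvWidth (x : Int) : Nat :=
  let d := if x = 0 then 0 else (PySem.Int.toChars x).length
  d + d % 2

-- halves(x): "" , "" when D == 0, else s = str(x).zfill(D); (s[:n], s[n:])
def pvHalves (D n : Nat) (x : Int) : String × String :=
  if D = 0 then ("", "")
  else
    let s := PySem.Chars.zfill (PySem.Int.toChars x) (D : Int)
    (String.ofList (PySem.List.slice s none (some (n : Int))),
     String.ofList (PySem.List.slice s (some (n : Int)) none))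

def multidata_alt (a : Int) (b : Int) : Int × String × String × String × String :=
  let D := max (pvWidth a) (pvWidth b)
  let n := D / 2
  ((n : Int), (pvHalves D n a).1, (pvHalves D n a).2, (pvHalves D n b).1, (pvHalves D n b).2)

-- ===== PRECONDITION & SPEC =====

-- A (and B) assert a >= 0 and b >= 0 and raise AssertionError otherwise.
def Pre_multidata (a : Int) (b : Int) : Prop := 0 ≤ a ∧ 0 ≤ b
instance (a : Int) (b : Int) : Decidable (Pre_multidata a b) := by unfold Pre_multidata; infer_instance

def pvWitness_multidata : Int × Int := (123, 4)

def Spec_multidata (a : Int) (b : Int) (out : Int × String × String × String × String) : Prop := out = multidata_alt a b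
instance (a : Int) (b : Int) (out : Int × String × String × String × String) : Decidable (Spec_multidata a b out) := by unfold Spec_multidata; infer_instance

-- ===== CLAIM (what is proved, stated in full; the proofs are below) =====
def Claim_equal_multidata : Prop := ∀ (a : Int) (b : Int), Dom_multidata a b → Pre_multidata a b → Spec_multidata a b (multidata a b)

-- ===== LEMMAS AND PROOFS =====

-- the zero-padding for-loop appends k zeros
theorem pvFoldAppendZero (k : Nat) (s : List Int) :
    (List.range' 0 k).foldl (fun l _ => l ++ [(0 : Int)]) s = s ++ List.replicate k 0 := by
  induction k generalizing s with
  | zero => simp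
  | succ k ih =>
    rw [List.range'_concat, List.foldl_append, ih]
    simp [List.replicate_succ']

-- Nat.toDigits (what str(n) prints) is the base-10 digits of Mathlib, reversed and rendered
theorem pvToDigitsCore_eq (f : Nat) : ∀ (n : Nat) (acc : List Char), n < f → 0 < n →
    Nat.toDigitsCore 10 f n acc = ((Nat.digits 10 n).map Nat.digitChar).reverse ++ acc := by
  induction f with
  | zero => intro n acc h; omega
  | succ f ih =>
    intro n acc hf hn
    rw [Nat.toDigitsCore]
    rw [Nat.digits_def' (by norm_num : 1 < 10) hn]
    by_cases h0 : n / 10 = 0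
    · simp [h0]
    · have h1 : 0 < n / 10 := Nat.pos_of_ne_zero h0
      have h2 : n / 10 < n := Nat.div_lt_self hn (by norm_num)
      simp only [h0, if_false]
      rw [ih (n / 10) _ (by omega) h1]
      simp

theorem pvToChars_pos (m : Nat) (hm : 0 < m) :
    PySem.Int.toChars (m : Int) = ((Nat.digits 10 m).map Nat.digitChar).reverse := by
  have : ¬ ((m : Int) < 0) := by omega
  simp only [PySem.Int.toChars, this, if_false, Int.toNat_natCast]
  rw [Nat.toDigits, pvToDigitsCore_eq (m + 1) m [] (by omega) hm]
  simp

theorem pvToChars_digit (d : Nat) (hd : d < 10) :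
    PySem.Int.toChars (d : Int) = [Nat.digitChar d] := by
  rcases Nat.eq_zero_or_pos d with h | h
  · subst h; rfl
  · rw [pvToChars_pos d h]
    rw [Nat.digits_def' (by norm_num : 1 < 10) h]
    rw [Nat.div_eq_of_lt hd]
    simp [Nat.mod_eq_of_lt hd]

theorem pvFlatMap_toChars (l : List Nat) (h : ∀ d ∈ l, d < 10) :
    (l.map (fun d : Nat => (d : Int))).flatMap PySem.Int.toChars = l.map Nat.digitChar := by
  induction l with
  | nil => rfl
  | cons x xs ih =>
    simp only [List.map_cons, List.flatMap_cons]
    rw [pvToChars_digit x (h x (by simp)), ih (fun d hd => h d (by simp [hd]))]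
    rfl

-- the while loop computes exactly the base-10 digit list (little-endian) and its length
theorem pvMaxidxGo_spec (m : Nat) (k : Nat) : ∀ (maxi : Nat) (acc : List Int),
    (Nat.digits 10 m).length - maxi = k → maxi ≤ (Nat.digits 10 m).length →
    pvMaxidxGo (m : Int) acc maxi =
      (acc ++ ((Nat.digits 10 m).drop maxi).map (fun d : Nat => (d : Int)), (Nat.digits 10 m).length) := by
  induction k with
  | zero =>
    intro maxi acc hk hle
    have hm : maxi = (Nat.digits 10 m).length := by omega
    have hlt : m < 10 ^ maxi := by
      rw [← Nat.digits_length_le_iff (by norm_num : 1 < 10)]; omega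
    rw [pvMaxidxGo]
    have hnc : ¬ ((10 : Int) ^ maxi ≤ (m : Int)) := by
      intro hcon
      have : (10 : Nat) ^ maxi ≤ m := by exact_mod_cast hcon
      omega
    rw [dif_neg hnc]
    simp [hm]
  | succ k ih =>
    intro maxi acc hk hle
    have hlt : maxi < (Nat.digits 10 m).length := by omega
    have hpow : 10 ^ maxi ≤ m := (Nat.lt_digits_length_iff (by norm_num) m).mp hlt
    rw [pvMaxidxGo]
    have hc : (10 : Int) ^ maxi ≤ (m : Int) := by exact_mod_cast hpow
    simp only [hc, dif_pos]
    have hdig : PySem.Int.floordiv (PySem.Int.mod (m : Int) ((10 : Int) ^ (maxi + 1))) ((10 : Int) ^ maxi)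
        = ((Nat.digits 10 m)[maxi] : Int) := by
      rw [PySem.Int.mod_eq_emod_of_pos (by positivity), PySem.Int.floordiv_eq_ediv_of_pos (by positivity)]
      have : ((m : Int) % (10 : Int) ^ (maxi + 1)) / (10 : Int) ^ maxi
          = ((m % 10 ^ (maxi + 1) / 10 ^ maxi : Nat) : Int) := by push_cast; rfl
      rw [this]
      congr 1
      rw [pow_succ, Nat.mod_mul_right_div_self]
      have := Nat.getD_digits m maxi (by norm_num : 2 ≤ 10)
      rw [List.getD_eq_getElem _ _ hlt] at this
      omega
    rw [hdig, ih (maxi + 1) _ (by omega) (by omega)]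
    have hcons : List.drop maxi (Nat.digits 10 m) = (Nat.digits 10 m)[maxi] :: List.drop (maxi + 1) (Nat.digits 10 m) :=
      List.drop_eq_getElem_cons hlt
    rw [hcons]
    simp only [List.map_cons, List.append_assoc, List.singleton_append]

-- both string-building loops of A are flatMap over a segment of the reversed digit list
theorem pvSepFold_eq (sd : List Int) (s : Nat) : ∀ (k : Nat), s + k ≤ sd.length →
    (List.range' s k).foldl
      (fun st (i : Nat) => st ++ PySem.Int.toChars (PySem.List.pyGetD sd ((sd.length : Int) - (i : Int) - 1) 0)) []
    = ((sd.reverse.drop s).take k).flatMap PySem.Int.toChars := by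
  intro k
  induction k with
  | zero => intro _; simp
  | succ k ih =>
    intro h
    rw [List.range'_concat, List.foldl_append, ih (by omega)]
    have h1 : s + k < sd.length := by omega
    have hget : PySem.List.pyGetD sd ((sd.length : Int) - ((s + 1 * k : Nat) : Int) - 1) 0
        = sd[sd.length - 1 - (s + k)] := by
      have he : ((sd.length : Int) - ((s + 1 * k : Nat) : Int) - 1) = ((sd.length - 1 - (s + k) : Nat) : Int) := by
        push_cast; omega
      rw [he, PySem.List.pyGetD_eq_getElem _ _ (by positivity) (by exact_mod_cast (by omega : sd.length - 1 - (s + k) < sd.length))]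
      simp
    simp only [List.foldl_cons, List.foldl_nil, hget]
    have hlen2 : k < (sd.reverse.drop s).length := by simp; omega
    rw [List.take_add_one, List.getElem?_eq_getElem hlen2, List.flatMap_append]
    simp only [Option.toList_some, List.flatMap_cons, List.flatMap_nil, List.append_nil]
    have hidx : (sd.reverse.drop s)[k]'hlen2 = sd[sd.length - 1 - (s + k)]'(by omega) := by
      rw [List.getElem_drop, List.getElem_reverse]
    rw [hidx]

theorem pvSepUp_eq (sd : List Int) (n maxi : Nat) (hm : maxi = sd.length) (h : n ≤ sd.length) :
    pvSepUp sd n maxi = (sd.reverse.take n).flatMap PySem.Int.toChars := by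
  subst hm
  rw [pvSepUp, pvSepFold_eq sd 0 n (by omega)]
  simp

theorem pvSepDown_eq (sd : List Int) (n maxi : Nat) (hm : maxi = sd.length) (h : n ≤ sd.length) :
    pvSepDown sd n maxi = (sd.reverse.drop n).flatMap PySem.Int.toChars := by
  subst hm
  rw [pvSepDown, pvSepFold_eq sd n (sd.length - n) (by omega)]
  rw [List.take_of_length_le (by simp)]

-- the zero-padded reversed digit rendering common to both sides
def pvPadChars (m D : Nat) : List Char :=
  (((Nat.digits 10 m) ++ List.replicate (D - (Nat.digits 10 m).length) 0).reverse).map Nat.digitChar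

theorem pvDigitChar_not_sign (d : Nat) (hd : d < 10) : Nat.digitChar d ≠ '+' ∧ Nat.digitChar d ≠ '-' := by
  interval_cases d <;> exact ⟨by decide, by decide⟩

theorem pvZfill_chars (m D : Nat) (hD : 0 < D) (hLD : (Nat.digits 10 m).length ≤ D) :
    PySem.Chars.zfill (PySem.Int.toChars (m : Int)) (D : Int) = pvPadChars m D := by
  rcases Nat.eq_zero_or_pos m with hm | hm
  · subst hm
    have h0 : PySem.Int.toChars ((0 : Nat) : Int) = ['0'] := rfl
    rw [h0, pvPadChars]
    simp only [Nat.digits_zero, List.nil_append, List.length_nil, Nat.sub_zero,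
      List.reverse_replicate, List.map_replicate]
    rcases Nat.lt_or_ge 1 D with h1 | h1
    · rw [PySem.Chars.zfill.eq_def]
      have hc1 : ¬ ((D : Int) ≤ ((List.length ['0'] : Nat) : Int)) := by
        simp only [List.length_cons, List.length_nil]
        push_cast
        omega
      have hc2 : ¬ ('0' = '+' ∨ '0' = '-') := by decide
      simp only [hc2, Int.toNat_natCast, List.length_cons, List.length_nil]
      have hdc0 : Nat.digitChar 0 = '0' := rfl
      rw [hdc0]
      rw [if_neg (show ¬ ((D : Int) ≤ ((0 + 1 : Nat) : Int)) by push_cast; omega)]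
      conv_rhs => rw [show D = (D - 1) + 1 by omega]
      rw [List.replicate_succ']
      norm_num
    · have hD1 : D = 1 := by omega
      subst hD1
      rfl
  · rw [pvToChars_pos m hm]
    have hlen : (((Nat.digits 10 m).map Nat.digitChar).reverse).length = (Nat.digits 10 m).length := by
      simp
    have hL1 : 0 < (Nat.digits 10 m).length := by
      have : Nat.digits 10 m ≠ [] := Nat.digits_ne_nil_iff_ne_zero.mpr (by omega)
      exact List.length_pos_iff.mpr this
    have hpad : pvPadChars m D
        = List.replicate (D - (Nat.digits 10 m).length) '0' ++ ((Nat.digits 10 m).map Nat.digitChar).reverse := by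
      rw [pvPadChars, List.reverse_append, List.reverse_replicate, List.map_append, List.map_replicate,
        List.map_reverse]
      rfl
    rcases Nat.lt_or_ge (Nat.digits 10 m).length D with h1 | h1
    · rw [PySem.Chars.zfill.eq_def]
      have hnle : ¬ ((D : Int) ≤ (((((Nat.digits 10 m).map Nat.digitChar).reverse) : List Char).length : Int)) := by
        rw [hlen]; omega
      simp only [hnle, if_false]
      obtain ⟨c, rest, hcr⟩ : ∃ c rest, ((Nat.digits 10 m).map Nat.digitChar).reverse = c :: rest := by
        rcases h : ((Nat.digits 10 m).map Nat.digitChar).reverse with _ | ⟨c, rest⟩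
        · exfalso; rw [h] at hlen; simp at hlen; omega
        · exact ⟨c, rest, rfl⟩
      rw [hcr]
      have hcmem : c ∈ (Nat.digits 10 m).map Nat.digitChar := by
        have : c ∈ ((Nat.digits 10 m).map Nat.digitChar).reverse := by rw [hcr]; simp
        simpa using this
      obtain ⟨d, hdm, hdc⟩ := List.mem_map.mp hcmem
      have hsign : ¬ (c = '+' ∨ c = '-') := by
        rcases pvDigitChar_not_sign d (Nat.digits_lt_base (by norm_num) hdm) with ⟨hp, hmn⟩
        rw [← hdc]
        simp [hp, hmn]
      simp only [hsign, if_false]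
      rw [hpad, ← hcr]
      congr 2
      rw [hcr]
      simp only [List.length_cons]
      have hr : rest.length + 1 = (Nat.digits 10 m).length := by rw [← hlen, hcr]; simp
      rw [Int.toNat_natCast]
      omega
    · have hDL : D = (Nat.digits 10 m).length := by omega
      rw [PySem.Chars.zfill.eq_def]
      have hle : (D : Int) ≤ (((((Nat.digits 10 m).map Nat.digitChar).reverse) : List Char).length : Int) := by
        rw [hlen]; omega
      simp only [hle, if_true]
      rw [hpad, hDL]
      simp

theorem pvWidth_eq (m : Nat) :
    pvWidth (m : Int) = (Nat.digits 10 m).length + (Nat.digits 10 m).length % 2 := by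
  rcases Nat.eq_zero_or_pos m with hm | hm
  · subst hm; rfl
  · rw [pvWidth]
    have h0 : ¬ ((m : Int) = 0) := by omega
    simp only [h0, if_false]
    rw [pvToChars_pos m hm]
    simp

-- per-side characterization: with final digit list sd (padded to length D), the two
-- strings A builds are take/drop of pvPadChars
theorem pvSide_eq (m D n k : Nat) (hk : (Nat.digits 10 m).length + k = D) (hn : n ≤ D) :
    pvSepUp ((Nat.digits 10 m).map (fun d : Nat => (d : Int)) ++ List.replicate k 0) n D
      = (pvPadChars m D).take n ∧
    pvSepDown ((Nat.digits 10 m).map (fun d : Nat => (d : Int)) ++ List.replicate k 0) n D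
      = (pvPadChars m D).drop n := by
  have hk' : k = D - (Nat.digits 10 m).length := by omega
  subst hk'
  have hLD : (Nat.digits 10 m).length ≤ D := by omega
  have hmap : (Nat.digits 10 m).map (fun d : Nat => (d : Int)) ++ List.replicate (D - (Nat.digits 10 m).length) 0
      = ((Nat.digits 10 m) ++ List.replicate (D - (Nat.digits 10 m).length) 0).map (fun d : Nat => (d : Int)) := by
    rw [List.map_append, List.map_replicate]
    rfl
  rw [hmap]
  have hlenN : ((Nat.digits 10 m) ++ List.replicate (D - (Nat.digits 10 m).length) 0).length = D := by
    simp only [List.length_append, List.length_replicate]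
    omega
  have hlen : (((Nat.digits 10 m) ++ List.replicate (D - (Nat.digits 10 m).length) 0).map (fun d : Nat => (d : Int))).length = D := by
    rw [List.length_map, hlenN]
  have hdigs : ∀ d ∈ ((Nat.digits 10 m) ++ List.replicate (D - (Nat.digits 10 m).length) 0).reverse, d < 10 := by
    intro d hd
    rw [List.mem_reverse] at hd
    rcases List.mem_append.mp hd with h | h
    · exact Nat.digits_lt_base (by norm_num) h
    · have := List.eq_of_mem_replicate h; omega
  constructor
  · rw [pvSepUp_eq _ n D hlen.symm (by omega)]
    rw [← List.map_reverse, ← List.map_take,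
      pvFlatMap_toChars _ (fun d hd => hdigs d (List.mem_of_mem_take hd)), pvPadChars, List.map_take]
  · rw [pvSepDown_eq _ n D hlen.symm (by omega)]
    rw [← List.map_reverse, ← List.map_drop,
      pvFlatMap_toChars _ (fun d hd => hdigs d (List.mem_of_mem_drop hd)), pvPadChars, List.map_drop]

theorem pvHalves_eq (E m : Nat) (hm : (Nat.digits 10 m).length ≤ E) :
    pvHalves E (E / 2) (m : Int)
      = (String.ofList ((pvPadChars m E).take (E / 2)), String.ofList ((pvPadChars m E).drop (E / 2))) := by
  rcases Nat.eq_zero_or_pos E with hE | hE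
  · subst hE
    have hnil : Nat.digits 10 m = [] := List.eq_nil_of_length_eq_zero (by omega)
    rw [pvHalves, pvPadChars, hnil]
    rfl
  · rw [pvHalves]
    simp only [Nat.pos_iff_ne_zero.mp hE, if_false]
    rw [pvZfill_chars m E hE hm]
    rw [PySem.List.slice_to_natCast, PySem.List.slice_from_natCast]

theorem pvMain (p q : Nat) : multidata (p : Int) (q : Int) = multidata_alt (p : Int) (q : Int) := by
  have hMa : pvMaxidx (p : Int) = ((Nat.digits 10 p).map (fun d : Nat => (d : Int)), (Nat.digits 10 p).length) := by
    rw [pvMaxidx, pvMaxidxGo_spec p (Nat.digits 10 p).length 0 [] (by omega) (by omega)]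
    simp
  have hMb : pvMaxidx (q : Int) = ((Nat.digits 10 q).map (fun d : Nat => (d : Int)), (Nat.digits 10 q).length) := by
    rw [pvMaxidx, pvMaxidxGo_spec q (Nat.digits 10 q).length 0 [] (by omega) (by omega)]
    simp
  have eN : ∀ L : Nat, (if L / 2 * 2 < L then L / 2 + 1 else L / 2) = (L + L % 2) / 2 := by
    intro L; split_ifs <;> omega
  have eM : ∀ L : Nat, (if L / 2 * 2 < L then L + 1 else L) = L + L % 2 := by
    intro L; split_ifs <;> omega
  have eS : ∀ (L : Nat) (sd : List Int),
      (if L / 2 * 2 < L then sd ++ [(0 : Int)] else sd) = sd ++ List.replicate (L % 2) 0 := by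
    intro L sd
    split_ifs with h
    · rw [show L % 2 = 1 by omega, List.replicate_one]
    · rw [show L % 2 = 0 by omega, List.replicate_zero, List.append_nil]
  set La := (Nat.digits 10 p).length with hLa
  set Lb := (Nat.digits 10 q).length with hLb
  simp only [multidata, multidata_alt, hMa, hMb, pvWidth_eq]
  rw [eN La, eM La, eS La, eN Lb, eM Lb, eS Lb]
  by_cases hcmp : Lb + Lb % 2 ≤ La + La % 2
  · simp only [hcmp, if_true]
    rw [pvFoldAppendZero]
    rw [List.append_assoc, ← List.replicate_add]
    rw [show Lb % 2 + (La + La % 2 - (Lb + Lb % 2)) = La + La % 2 - Lb by omega]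
    rw [Nat.max_eq_left hcmp]
    rw [(pvSide_eq p (La + La % 2) ((La + La % 2) / 2) (La % 2) (by omega) (by omega)).1,
        (pvSide_eq p (La + La % 2) ((La + La % 2) / 2) (La % 2) (by omega) (by omega)).2,
        (pvSide_eq q (La + La % 2) ((La + La % 2) / 2) (La + La % 2 - Lb) (by omega) (by omega)).1,
        (pvSide_eq q (La + La % 2) ((La + La % 2) / 2) (La + La % 2 - Lb) (by omega) (by omega)).2]
    rw [pvHalves_eq (La + La % 2) p (by omega), pvHalves_eq (La + La % 2) q (by omega)]
  · simp only [hcmp, if_false]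
    rw [pvFoldAppendZero]
    rw [List.append_assoc, ← List.replicate_add]
    rw [show La % 2 + (Lb + Lb % 2 - (La + La % 2)) = Lb + Lb % 2 - La by omega]
    rw [Nat.max_eq_right (by omega)]
    rw [(pvSide_eq p (Lb + Lb % 2) ((Lb + Lb % 2) / 2) (Lb + Lb % 2 - La) (by omega) (by omega)).1,
        (pvSide_eq p (Lb + Lb % 2) ((Lb + Lb % 2) / 2) (Lb + Lb % 2 - La) (by omega) (by omega)).2,
        (pvSide_eq q (Lb + Lb % 2) ((Lb + Lb % 2) / 2) (Lb % 2) (by omega) (by omega)).1,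
        (pvSide_eq q (Lb + Lb % 2) ((Lb + Lb % 2) / 2) (Lb % 2) (by omega) (by omega)).2]
    rw [pvHalves_eq (Lb + Lb % 2) p (by omega), pvHalves_eq (Lb + Lb % 2) q (by omega)]

-- ===== VERDICT (by name: the statement is the Claim_ definition above) =====
theorem multidata_spec : Claim_equal_multidata := by
  intro a b _ hpre
  obtain ⟨ha, hb⟩ := hpre
  unfold Spec_multidata
  obtain ⟨p, rfl⟩ : ∃ p : Nat, a = (p : Int) := ⟨a.toNat, (Int.toNat_of_nonneg ha).symm⟩
  obtain ⟨q, rfl⟩ : ∃ q : Nat, b = (q : Int) := ⟨b.toNat, (Int.toNat_of_nonneg hb).symm⟩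
  exact pvMain p q
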